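-- pv_equiv track=rewrite | github.com/wnstj-yang/Algorithm | Programmers/programmers_[1차] 프렌즈4블록.py | down
-- ===== SOURCE A (Python) =====
-- def down(arr, n, m):
--     temp = [[0] * n for _ in range(m)]
--     # 각 열의 남아있는 캐릭터들을 구한다. 밑에서부터
--     columns = [[] for _ in range(n)]
--     for j in range(n):
--         for i in range(m - 1, -1, -1):
--             if arr[i][j] != 0:
--                 columns[j].append(arr[i][j])
--     # 값에 넣는다
--     for j in range(n):
--         idx = m - 1
--         for i in range(len(columns[j])):
--             temp[idx][j] = columns[j][i]
--             idx -= 1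
--     return temp
-- ===== SOURCE B (Python) =====
-- def down(arr, n, m):
--     # Gravity as a stable sort: in each column, sort by the key (x != 0);
--     # False < True puts the zeros on top and, by stability, keeps the
--     # non-zero values in their original top-down order. Then transpose.
--     cols = [sorted((arr[i][j] for i in range(m)), key=lambda x: x != 0)
--             for j in range(n)]
--     return [[cols[j][i] for j in range(n)] for i in range(m)]
-- ===== Notes on version B (the rewrite author's own statement) =====
-- stated objective: alternative
-- what changed: Replaces A's two-phase per-column compaction (collect surviving values bottom-up, then write them back into a mutated temp grid with a decreasing index) by a stable sort of each column under the key (x != 0) -- False < True floats the zeros to the top while stability keeps the non-zeros in order -- followed by a transpose.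
import Mathlib
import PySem

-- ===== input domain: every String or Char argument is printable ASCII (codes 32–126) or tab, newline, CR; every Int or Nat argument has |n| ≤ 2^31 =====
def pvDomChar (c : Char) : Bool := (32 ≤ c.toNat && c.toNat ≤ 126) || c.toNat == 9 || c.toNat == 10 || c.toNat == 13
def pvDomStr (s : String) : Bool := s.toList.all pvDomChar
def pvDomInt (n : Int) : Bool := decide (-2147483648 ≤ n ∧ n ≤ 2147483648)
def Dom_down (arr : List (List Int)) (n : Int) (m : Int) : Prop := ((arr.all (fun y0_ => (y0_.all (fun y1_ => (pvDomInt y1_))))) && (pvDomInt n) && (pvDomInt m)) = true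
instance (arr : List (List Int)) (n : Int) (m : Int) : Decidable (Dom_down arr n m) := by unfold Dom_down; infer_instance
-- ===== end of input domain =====

-- B computes column gravity as a stable sort of each column by the key (x != 0)
-- (zeros first, non-zeros keep their order) and transposes (objective: alternative).

-- arr[i][j], total under Pre_down (both Pythons perform exactly these accesses)
def pyG2 (arr : List (List Int)) (i j : Int) : Int :=
  PySem.List.pyGetD (PySem.List.pyGetD arr i []) j 0

-- ===== PORT A =====
def down (arr : List (List Int)) (n : Int) (m : Int) : List (List Int) :=
  -- temp = [[0] * n for _ in range(m)]
  let temp := (PySem.List.pyRange 0 m 1).map (fun _ => List.replicate n.toNat 0)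
  -- columns[j] built bottom-up: for i in range(m-1, -1, -1): if arr[i][j] != 0: append
  let columns := (PySem.List.pyRange 0 n 1).map (fun j =>
    (PySem.List.pyRange (m - 1) (-1) (-1)).foldl (fun acc i =>
      if pyG2 arr i j ≠ 0 then acc ++ [pyG2 arr i j] else acc) [])
  -- for j in range(n): idx = m-1; for i in range(len(columns[j])): temp[idx][j] = columns[j][i]; idx -= 1
  (PySem.List.pyRange 0 n 1).foldl (fun tmp j =>
    let col := PySem.List.pyGetD columns j []
    ((PySem.List.pyRange 0 (col.length : Int) 1).foldl
      (fun (st : List (List Int) × Int) i =>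
        (PySem.List.pySetD st.1 st.2
          (PySem.List.pySetD (PySem.List.pyGetD st.1 st.2 []) j (PySem.List.pyGetD col i 0)),
         st.2 - 1))
      (tmp, m - 1)).1) temp

-- ===== PORT B =====
def down_alt (arr : List (List Int)) (n : Int) (m : Int) : List (List Int) :=
  -- cols = [sorted((arr[i][j] for i in range(m)), key=lambda x: x != 0) for j in range(n)]
  let cols := (PySem.List.pyRange 0 n 1).map (fun j =>
    PySem.List.sorted ((PySem.List.pyRange 0 m 1).map (fun i => pyG2 arr i j))
      (fun x => decide (x ≠ 0)) false)
  -- return [[cols[j][i] for j in range(n)] for i in range(m)]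
  (PySem.List.pyRange 0 m 1).map (fun i =>
    (PySem.List.pyRange 0 n 1).map (fun j =>
      PySem.List.pyGetD (PySem.List.pyGetD cols j []) i 0))

-- ===== PRECONDITION & SPEC =====
-- Exactly where the Python A returns: with positive n and m it indexes arr[i][j] for
-- every i < m, j < n, so it needs m ≤ len(arr) and every one of the first m rows of
-- length ≥ n; otherwise (n ≤ 0 or m ≤ 0) the indexing loops never run.
def Pre_down (arr : List (List Int)) (n : Int) (m : Int) : Prop :=
  n ≤ 0 ∨ m ≤ 0 ∨ (m ≤ (arr.length : Int) ∧ ∀ row ∈ arr.take m.toNat, n ≤ (row.length : Int))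
instance (arr : List (List Int)) (n : Int) (m : Int) : Decidable (Pre_down arr n m) := by
  unfold Pre_down; infer_instance

def pvWitness_down : List (List Int) × Int × Int := ([[1, 0], [0, 2]], 2, 2)

def Spec_down (arr : List (List Int)) (n : Int) (m : Int) (out : List (List Int)) : Prop := out = down_alt arr n m
instance (arr : List (List Int)) (n : Int) (m : Int) (out : List (List Int)) : Decidable (Spec_down arr n m out) := by unfold Spec_down; infer_instance

-- ===== CLAIM (what is proved, stated in full; the proofs are below) =====
def Claim_equal_down : Prop := ∀ (arr : List (List Int)) (n : Int) (m : Int), Dom_down arr n m → Pre_down arr n m → Spec_down arr n m (down arr n m)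

-- ===== LEMMAS AND PROOFS =====

theorem foldl_app {α β : Type} (p : α → Prop) [DecidablePred p] (f : α → β) (l : List α) (acc : List β) :
    l.foldl (fun acc x => if p x then acc ++ [f x] else acc) acc
      = acc ++ (l.filter (fun x => decide (p x))).map f := by
  induction l generalizing acc with
  | nil => simp
  | cons a l ih => by_cases h : p a <;> simp [h, ih]

theorem self_eq_map {α : Type} [Inhabited α] (t : List α) (d : α) :
    t = (List.range t.length).map (fun r => t.getD r d) := by
  apply List.ext_getElem
  · simp
  · intro i h1 h2
    simp only [List.getElem_map, List.getElem_range, List.getD_eq_getElem?_getD]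
    rw [List.getElem?_eq_getElem h1]; rfl

theorem set_map_range {α : Type} (N : Nat) (f : Nat → α) (t : Nat) (v : α) :
    ((List.range N).map f).set t v = (List.range N).map (fun c => if c = t then v else f c) := by
  apply List.ext_getElem
  · simp
  · intro i h1 h2
    simp only [List.getElem_set, List.getElem_map, List.getElem_range]
    by_cases h : t = i
    · subst h; simp
    · rw [if_neg h, if_neg (by omega)]

def colB (arr : List (List Int)) (m : Int) (c : Nat) : List Int :=
  ((PySem.List.pyRange 0 m 1).filter (fun i => decide (pyG2 arr i ↑c ≠ 0))).map (fun i => pyG2 arr i ↑c)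

def padC (arr : List (List Int)) (m : Int) (c : Nat) : List Int :=
  List.replicate (m.toNat - (colB arr m c).length) 0 ++ colB arr m c

theorem lenB (arr : List (List Int)) (m : Int) (c : Nat) : (colB arr m c).length ≤ m.toNat := by
  simp only [colB, List.length_map]
  calc _ ≤ (PySem.List.pyRange 0 m 1).length := List.length_filter_le _ _
  _ = m.toNat := by simp [PySem.List.length_pyRange_one]

theorem write_spec (j : Int) (col : List Int) (t : List (List Int)) (K : Nat) (hK : K ≤ t.length) :
    (PySem.List.pyRange 0 (K : Int) 1).foldl
      (fun (st : List (List Int) × Int) i =>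
        (PySem.List.pySetD st.1 st.2
          (PySem.List.pySetD (PySem.List.pyGetD st.1 st.2 []) j (PySem.List.pyGetD col i 0)),
         st.2 - 1))
      (t, (t.length : Int) - 1)
    = ((List.range t.length).map (fun r =>
         if t.length - K ≤ r then
           PySem.List.pySetD (t.getD r []) j (col.getD (t.length - 1 - r) 0)
         else t.getD r []),
       (t.length : Int) - 1 - K) := by
  induction K with
  | zero =>
    rw [show ((0:Nat):Int) = 0 by rfl, PySem.List.pyRange_one_eq_nil le_rfl]
    simp only [List.foldl_nil, Nat.sub_zero, sub_zero]
    refine Prod.ext ?_ (by simp)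
    show t = _
    calc t = (List.range t.length).map (fun r => t.getD r []) := self_eq_map t []
    _ = _ := by
      apply List.map_congr_left
      intro r hr
      rw [if_neg (by simp at hr; omega)]
  | succ K ih =>
    have hK' : K ≤ t.length := Nat.le_of_succ_le hK
    rw [show ((K+1:Nat):Int) = (K:Int) + 1 by omega,
        PySem.List.pyRange_one_succ_right (by positivity), List.foldl_append, ih hK']
    simp only [List.foldl_cons, List.foldl_nil]
    have e1 : (↑t.length - 1 - (K:Int)) = ((t.length - 1 - K : Nat) : Int) := by omega
    rw [e1, PySem.List.pySetD_natCast, PySem.List.pyGetD_natCast, PySem.List.pyGetD_natCast]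
    refine Prod.ext ?_ (by simp; omega)
    show (List.map _ (List.range t.length)).set (t.length - 1 - K)
        (PySem.List.pySetD (((List.range t.length).map _).getD (t.length - 1 - K) []) j (col.getD K 0)) = _
    have hr0 : t.length - 1 - K < t.length := by omega
    have e2 : (((List.range t.length).map (fun r =>
         if t.length - K ≤ r then PySem.List.pySetD (t.getD r []) j (col.getD (t.length - 1 - r) 0)
         else t.getD r [])).getD (t.length - 1 - K) []) = t.getD (t.length - 1 - K) [] := by
      rw [List.getD_eq_getElem?_getD, List.getElem?_eq_getElem (by simpa using hr0)]
      simp only [List.getElem_map, List.getElem_range, Option.getD_some]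
      rw [if_neg (by omega)]
    rw [e2, set_map_range]
    apply List.map_congr_left
    intro r hr
    simp only [List.mem_range] at hr
    by_cases h : r = t.length - 1 - K
    · subst h
      rw [if_pos rfl, if_pos (by omega)]
      congr 2
      omega
    · rw [if_neg h]
      by_cases h2 : t.length - K ≤ r
      · rw [if_pos h2, if_pos (by omega)]
      · rw [if_neg h2, if_neg (by omega)]

theorem colA_eq (arr : List (List Int)) (m : Int) (c : Nat) :
    (PySem.List.pyRange (m - 1) (-1) (-1)).foldl
      (fun acc i => if pyG2 arr i ↑c ≠ 0 then acc ++ [pyG2 arr i ↑c] else acc) []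
      = (colB arr m c).reverse := by
  rw [show PySem.List.pyRange (m - 1) (-1) (-1) = (PySem.List.pyRange 0 m 1).reverse from by
        have := PySem.List.pyRange_neg_one_eq_reverse (m - 1) (-1); simpa using this]
  rw [foldl_app]
  simp [colB, List.filter_reverse, List.map_reverse]

-- insertBy with the 0/1 key: a zero goes after the zeros, before the non-zeros
theorem ins_zero (z : Nat) (nzs : List Int) (h : ∀ x ∈ nzs, x ≠ 0) :
    PySem.List.insertBy (fun a b => decide ((decide (a ≠ 0)) < (decide (b ≠ 0)))) 0
      (List.replicate z 0 ++ nzs) = List.replicate (z + 1) 0 ++ nzs := by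
  induction z with
  | zero =>
    cases nzs with
    | nil => simp [PySem.List.insertBy]
    | cons y t =>
      have hy : y ≠ 0 := h y (by simp)
      simp [PySem.List.insertBy, hy]
  | succ z ih =>
    rw [show (z + 1) = z + 1 from rfl]
    simp only [List.replicate_succ, List.cons_append]
    rw [show PySem.List.insertBy (fun a b => decide ((decide (a ≠ 0)) < (decide (b ≠ 0)))) 0
          (0 :: (List.replicate z 0 ++ nzs))
        = 0 :: PySem.List.insertBy (fun a b => decide ((decide (a ≠ 0)) < (decide (b ≠ 0)))) 0
          (List.replicate z 0 ++ nzs) from by simp [PySem.List.insertBy]]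
    rw [ih]
    simp [List.replicate_succ]

-- insertBy with the 0/1 key: a non-zero is appended at the end
theorem ins_nz (x : Int) (hx : x ≠ 0) (ys : List Int) :
    PySem.List.insertBy (fun a b => decide ((decide (a ≠ 0)) < (decide (b ≠ 0)))) x ys
      = ys ++ [x] := by
  apply PySem.List.insertBy_of_forall_not_before
  intro y _
  simp [hx]

-- invariant of the insertion-sort fold: zeros so far ++ non-zeros so far
theorem fold_inv (l : List Int) (z : Nat) (nzs : List Int) (h : ∀ x ∈ nzs, x ≠ 0) :
    l.foldl (fun acc x =>
        PySem.List.insertBy (fun a b => decide ((decide (a ≠ 0)) < (decide (b ≠ 0)))) x acc)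
      (List.replicate z 0 ++ nzs)
    = List.replicate (z + l.countP (fun x => decide (x = 0))) 0
        ++ (nzs ++ l.filter (fun x => decide (x ≠ 0))) := by
  induction l generalizing z nzs with
  | nil => simp
  | cons x t ih =>
    by_cases hx : x = 0
    · subst hx
      simp only [List.foldl_cons]
      rw [ins_zero z nzs h, ih (z + 1) nzs h]
      simp only [List.countP_cons, List.filter_cons]
      norm_num [Nat.add_assoc, Nat.add_comm 1]
    · have h' : ∀ y ∈ nzs ++ [x], y ≠ 0 := by
        intro y hy
        rcases List.mem_append.mp hy with h1 | h1
        · exact h y h1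
        · simp only [List.mem_singleton] at h1
          subst h1; exact hx
      simp only [List.foldl_cons]
      rw [ins_nz x hx, List.append_assoc, ih z (nzs ++ [x]) h']
      simp [hx]

-- sorted by the key (x != 0) = zeros first, then the non-zeros in order
theorem sorted_spec (l : List Int) :
    PySem.List.sorted l (fun x => decide (x ≠ 0)) false
      = List.replicate (l.countP (fun x => decide (x = 0))) 0
          ++ l.filter (fun x => decide (x ≠ 0)) := by
  rw [PySem.List.sorted_eq_foldl_insertBy]
  have := fold_inv l 0 [] (by simp)
  simpa using this

theorem alt_norm (arr : List (List Int)) (n m : Int) :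
    down_alt arr n m = (List.range m.toNat).map (fun r =>
      (List.range n.toNat).map (fun c => (padC arr m c).getD r 0)) := by
  have hcols : ∀ j ∈ PySem.List.pyRange 0 n 1,
      PySem.List.sorted ((PySem.List.pyRange 0 m 1).map (fun i => pyG2 arr i j))
        (fun x => decide (x ≠ 0)) false = padC arr m j.toNat := by
    intro j hj
    have h0 : 0 ≤ j := (PySem.List.mem_pyRange_one.mp hj).1
    rw [show j = ((j.toNat : Nat) : Int) by omega]
    rw [sorted_spec]
    have hfil : ((PySem.List.pyRange 0 m 1).map (fun i => pyG2 arr i ((j.toNat : Nat) : Int))).filter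
        (fun x => decide (x ≠ 0)) = colB arr m j.toNat := by
      rw [List.filter_map]; rfl
    have hlen : ((PySem.List.pyRange 0 m 1).map (fun i => pyG2 arr i ((j.toNat : Nat) : Int))).length
        = m.toNat := by simp [PySem.List.length_pyRange_one]
    have hcnt : ((PySem.List.pyRange 0 m 1).map (fun i => pyG2 arr i ((j.toNat : Nat) : Int))).countP
          (fun x => decide (x = 0))
        = m.toNat - (colB arr m j.toNat).length := by
      have h1 := (List.length_eq_length_filter_add
        (l := (PySem.List.pyRange 0 m 1).map (fun i => pyG2 arr i ((j.toNat : Nat) : Int)))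
        (fun x => decide (x ≠ 0))).symm
      rw [hfil] at h1
      have h2 : ((PySem.List.pyRange 0 m 1).map (fun i => pyG2 arr i ((j.toNat : Nat) : Int))).countP
          (fun x => decide (x = 0))
        = (((PySem.List.pyRange 0 m 1).map (fun i => pyG2 arr i ((j.toNat : Nat) : Int))).filter
            (fun x => !decide (x ≠ 0))).length := by
        rw [← List.countP_eq_length_filter]
        apply List.countP_congr
        intro x _
        simp
      rw [h2]
      omega
    rw [hfil, hcnt]
    rfl
  simp only [down_alt]
  have hm : (PySem.List.pyRange 0 n 1).map (fun j =>
      PySem.List.sorted ((PySem.List.pyRange 0 m 1).map (fun i => pyG2 arr i j))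
        (fun x => decide (x ≠ 0)) false)
      = (List.range n.toNat).map (fun c => padC arr m c) := by
    rw [List.map_congr_left hcols, PySem.List.pyRange_one]
    simp [List.map_map, Function.comp]
  rw [hm, show PySem.List.pyRange 0 m 1 = (List.range m.toNat).map (fun k => ((k:Nat):Int)) from by
        rw [PySem.List.pyRange_one]; simp]
  simp only [List.map_map]
  apply List.map_congr_left
  intro r hr
  rw [show PySem.List.pyRange 0 n 1 = (List.range n.toNat).map (fun k => ((k:Nat):Int)) from by
        rw [PySem.List.pyRange_one]; simp]
  simp only [Function.comp_apply, List.map_map]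
  apply List.map_congr_left
  intro c hc
  simp only [Function.comp_apply, List.mem_range] at hc ⊢
  rw [PySem.List.pyGetD_natCast, PySem.List.pyGetD_natCast]
  congr 1
  rw [List.getD_eq_getElem?_getD, List.getElem?_eq_getElem (by simpa using hc)]
  simp

theorem outer_spec (arr : List (List Int)) (n m : Int) (t : Nat) (ht : t ≤ n.toNat) :
    (PySem.List.pyRange 0 (t : Int) 1).foldl (fun tmp j =>
      let col := PySem.List.pyGetD ((PySem.List.pyRange 0 n 1).map (fun j =>
        (PySem.List.pyRange (m - 1) (-1) (-1)).foldl (fun acc i =>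
          if pyG2 arr i j ≠ 0 then acc ++ [pyG2 arr i j] else acc) [])) j []
      ((PySem.List.pyRange 0 (col.length : Int) 1).foldl
        (fun (st : List (List Int) × Int) i =>
          (PySem.List.pySetD st.1 st.2
            (PySem.List.pySetD (PySem.List.pyGetD st.1 st.2 []) j (PySem.List.pyGetD col i 0)),
           st.2 - 1))
        (tmp, m - 1)).1)
      ((PySem.List.pyRange 0 m 1).map (fun _ => List.replicate n.toNat 0))
    = (List.range m.toNat).map (fun r => (List.range n.toNat).map (fun c =>
        if c < t then (padC arr m c).getD r 0 else 0)) := by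
  induction t with
  | zero =>
    rw [show ((0:Nat):Int) = 0 by rfl, PySem.List.pyRange_one_eq_nil le_rfl]
    simp only [List.foldl_nil]
    rw [PySem.List.pyRange_one]
    simp only [List.map_map, sub_zero]
    apply List.map_congr_left
    intro r hr
    simp only [Function.comp_apply, Nat.not_lt_zero, if_false]
    rw [List.map_const', List.length_range]
  | succ t ih =>
    have ht' : t ≤ n.toNat := Nat.le_of_succ_le ht
    rw [show ((t+1:Nat):Int) = (t:Int) + 1 by omega,
        PySem.List.pyRange_one_succ_right (by positivity), List.foldl_append, ih ht']
    simp only [List.foldl_cons, List.foldl_nil]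
    have hcol : PySem.List.pyGetD ((PySem.List.pyRange 0 n 1).map (fun j =>
        (PySem.List.pyRange (m - 1) (-1) (-1)).foldl (fun acc i =>
          if pyG2 arr i j ≠ 0 then acc ++ [pyG2 arr i j] else acc) [])) (t:Int) []
        = (colB arr m t).reverse := by
      rw [PySem.List.pyGetD_map_pyRange_of_nonneg _ _ _ _ (by positivity) (by omega), colA_eq]
    rw [hcol]
    by_cases hm : 0 ≤ m
    · have hL := lenB arr m t
      have hlen : (((List.range m.toNat).map (fun r => (List.range n.toNat).map (fun c =>
          if c < t then (padC arr m c).getD r 0 else 0))).length : Int) = m := by simp; omega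
      rw [show m - 1 = (((List.range m.toNat).map (fun r => (List.range n.toNat).map (fun c =>
          if c < t then (padC arr m c).getD r 0 else 0))).length : Int) - 1 by rw [hlen]]
      rw [write_spec _ _ _ _ (by simp; omega)]
      simp only [List.length_map, List.length_range, List.length_reverse]
      apply List.map_congr_left
      intro r hr
      simp only [List.mem_range] at hr
      have hF : ((List.range m.toNat).map (fun r => (List.range n.toNat).map (fun c =>
          if c < t then (padC arr m c).getD r 0 else 0))).getD r [] =
          (List.range n.toNat).map (fun c => if c < t then (padC arr m c).getD r 0 else 0) := by
        rw [List.getD_eq_getElem?_getD, List.getElem?_eq_getElem (by simpa using hr)]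
        simp
      rw [hF]
      by_cases hz : m.toNat - (colB arr m t).length ≤ r
      · rw [if_pos hz, PySem.List.pySetD_natCast, set_map_range]
        apply List.map_congr_left
        intro c hc
        simp only [List.mem_range] at hc
        by_cases hct : c = t
        · subst hct
          rw [if_pos rfl, if_pos (by omega)]
          have hidx : m.toNat - 1 - r < (colB arr m c).reverse.length := by
            simp only [List.length_reverse]; omega
          rw [List.getD_eq_getElem?_getD, List.getElem?_eq_getElem hidx]
          have hpad : r < (padC arr m c).length := by
            simp only [padC, List.length_append, List.length_replicate]; omega
          rw [List.getD_eq_getElem?_getD, List.getElem?_eq_getElem hpad]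
          simp only [Option.getD_some, List.getElem_reverse]
          unfold padC
          rw [List.getElem_append_right (by simp only [List.length_replicate]; omega)]
          simp only [List.length_replicate]
          congr 1
          omega
        · rw [if_neg hct]
          by_cases h2 : c < t
          · rw [if_pos h2, if_pos (by omega)]
          · rw [if_neg h2, if_neg (by omega)]
      · rw [if_neg hz]
        apply List.map_congr_left
        intro c hc
        simp only [List.mem_range] at hc
        by_cases h2 : c < t
        · rw [if_pos h2, if_pos (by omega)]
        · rw [if_neg h2]
          by_cases hct : c = t
          · subst hct
            rw [if_pos (by omega)]
            have hpad : r < (padC arr m c).length := by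
              simp only [padC, List.length_append, List.length_replicate]; omega
            rw [List.getD_eq_getElem?_getD, List.getElem?_eq_getElem hpad]
            unfold padC
            rw [Option.getD_some, List.getElem_append_left (by simp only [List.length_replicate]; omega)]
            simp
          · rw [if_neg (by omega)]
    · have hm0 : m.toNat = 0 := by omega
      have hcb : colB arr m t = [] := by
        simp [colB, PySem.List.pyRange_one_eq_nil (by omega : m ≤ (0:Int))]
      simp [hcb, hm0, PySem.List.pyRange_one_eq_nil (le_refl (0:Int))]


-- ===== VERDICT (by name: the statement is the Claim_ definition above) =====
theorem down_spec : Claim_equal_down := by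
  intro arr n m _ _
  unfold Spec_down
  rw [alt_norm]
  by_cases hn : 0 ≤ n
  · simp only [down]
    rw [show n = ((n.toNat : Nat) : Int) by omega]
    rw [outer_spec arr _ m n.toNat (by simp)]
    simp only [Int.toNat_natCast]
    apply List.map_congr_left
    intro r hr
    apply List.map_congr_left
    intro c hc
    simp only [List.mem_range] at hc
    rw [if_pos hc]
  · simp only [down]
    rw [PySem.List.pyRange_one_eq_nil (by omega : n ≤ (0:Int))]
    simp [show n.toNat = 0 by omega, PySem.List.pyRange_one]
    rw [show ((fun (_ : Int) => ([] : List Int)) ∘ fun (k : Nat) => ((k:Nat):Int)) = fun _ => ([] : List Int) from rfl,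
        List.map_const', List.length_range]
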